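-- pv_equiv track=rewrite | github.com/2SOOY/problem-solving | boj_기타리스트.py | solution
-- ===== SOURCE A (Python) =====
-- def find_max_volume(M, board):
--     LAST = len(board) - 1
--
--     for idx in range(M, -1, -1):
--         if board[LAST][idx]:
--             return idx
--
--     return -1
--
-- def solution(N, S, M, volumes):
--     answer = 0
--     board = [[0] * (M + 1) for _ in range(N + 1)] # [N개의 곡][0 ~ MAX볼륨] 형태로 배열 구성
--     board[0][S] = 1 # 최초 볼륨 check
--
--     for song in range(N): # N개의 곡에 대해
--         for volume in range(M + 1): # M개의 볼륨 탐색
--             if not board[song][volume]: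
--                 continue
--
--             plus_vol = volume + volumes[song]
--             minus_vol = volume - volumes[song]
--
--             # 다음 곡에 대해 볼륨 갱신
--             if 0 <= plus_vol <= M:
--                 board[song + 1][plus_vol] = 1
--             if 0 <= minus_vol <= M:
--                 board[song + 1][minus_vol] = 1
--
--     answer = find_max_volume(M, board)
--
--     return answer
-- ===== SOURCE B (Python) =====
-- def solution(N, S, M, volumes):
--     # Backward value-DP: f[v] = largest final volume attainable when the songs
--     # still to play start at volume v (-1 if none); no reachability table, no
--     # final downward scan -- the answer is just f[S].
--     f = list(range(M + 1))
--     for song in range(N - 1, -1, -1):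
--         d = volumes[song]
--         f = [max(f[v + d] if 0 <= v + d <= M else -1,
--                  f[v - d] if 0 <= v - d <= M else -1)
--              for v in range(M + 1)]
--     return f[S]
-- ===== Notes on version B (the rewrite author's own statement) =====
-- stated objective: alternative
-- what changed: Replaces A's forward reachability table (an (N+1)x(M+1) 0/1 board filled song by song, finished by a downward scan for the highest set cell) with a backward value-DP over a single list: f[v] = largest final volume attainable from volume v with the remaining songs, updated once per song in reverse, so the answer is read off as f[S] with no final scan.
-- outside the precondition, e.g. on solution(2, 0, 0, [1]): A returns -1, B raises IndexError
import Mathlib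
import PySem

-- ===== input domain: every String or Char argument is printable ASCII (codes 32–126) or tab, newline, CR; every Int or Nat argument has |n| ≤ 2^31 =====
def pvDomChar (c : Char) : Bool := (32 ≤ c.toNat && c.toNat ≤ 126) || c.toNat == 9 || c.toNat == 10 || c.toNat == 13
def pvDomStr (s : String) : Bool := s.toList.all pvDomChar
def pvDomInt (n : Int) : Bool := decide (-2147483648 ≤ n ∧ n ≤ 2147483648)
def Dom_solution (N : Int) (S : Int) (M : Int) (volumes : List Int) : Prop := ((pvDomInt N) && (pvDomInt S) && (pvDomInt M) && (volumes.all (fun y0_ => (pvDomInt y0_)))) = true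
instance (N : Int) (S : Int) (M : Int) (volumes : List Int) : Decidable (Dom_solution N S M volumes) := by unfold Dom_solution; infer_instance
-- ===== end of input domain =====

-- B replaces A's forward reachability board (an (N+1)x(M+1) 0/1 table plus a final
-- downward scan) with a backward value-DP over one list: f[v] = largest final volume
-- attainable from volume v with the remaining songs; alternative algorithm, not faster.
-- Both read entry S of a volume-indexed row (so Python's negative-index wrap at
-- -(M+1) <= S < 0 coincides in A and B); equivalence is exact on A's clean domain.


-- ===== PORT A =====
-- board[i][j] read / write-1 helpers (indices are in range on every admitted input,
-- so Nat indexing via .toNat is exact here)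
def pvGet2 (b : List (List Int)) (i j : Nat) : Int :=
  (b.getD i []).getD j 0

def pvSet2 (b : List (List Int)) (i j : Nat) : List (List Int) :=
  b.set i ((b.getD i []).set j 1)

-- the 'for idx in range(M,-1,-1): if board[LAST][idx]: return idx' loop
def pvScan (board : List (List Int)) (LAST : Nat) : List Int → Int
  | [] => -1
  | idx :: rest => if pvGet2 board LAST idx.toNat ≠ 0 then idx else pvScan board LAST rest

def find_max_volume (M : Int) (board : List (List Int)) : Int :=
  let LAST := board.length - 1
  pvScan board LAST (PySem.List.pyRange M (-1) (-1))

def solution (N : Int) (S : Int) (M : Int) (volumes : List Int) : Int :=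
  let board := List.replicate (N + 1).toNat (List.replicate (M + 1).toNat (0 : Int))
  let board := board.set 0 (PySem.List.pySetD (board.getD 0 []) S 1)  -- board[0][S] = 1 (Python negative-index wrap via pySetD)
  let board := (List.range N.toNat).foldl (fun b song =>
    (List.range (M + 1).toNat).foldl (fun b volume =>
      if pvGet2 b song volume = 0 then b
      else
        let plus_vol := (volume : Int) + volumes.getD song 0
        let minus_vol := (volume : Int) - volumes.getD song 0
        let b := if 0 ≤ plus_vol ∧ plus_vol ≤ M then pvSet2 b (song + 1) plus_vol.toNat else b
        if 0 ≤ minus_vol ∧ minus_vol ≤ M then pvSet2 b (song + 1) minus_vol.toNat else b) b) board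
  find_max_volume M board

-- ===== PORT B =====
def solution_alt (N : Int) (S : Int) (M : Int) (volumes : List Int) : Int :=
  let f : List Int := PySem.List.pyRange 0 (M + 1)
  let f := (PySem.List.pyRange (N - 1) (-1) (-1)).foldl (fun f song =>
    let d := PySem.List.pyGetD volumes song 0
    (PySem.List.pyRange 0 (M + 1)).map (fun v =>
      max (if 0 ≤ v + d ∧ v + d ≤ M then PySem.List.pyGetD f (v + d) 0 else -1)
          (if 0 ≤ v - d ∧ v - d ≤ M then PySem.List.pyGetD f (v - d) 0 else -1))) f
  PySem.List.pyGetD f S 0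

-- ===== PRECONDITION & SPEC =====
-- Pre_ is A's clean domain: outside it A raises IndexError (S > M or S < -(M+1),
-- N < 0, and N > len(volumes) whenever song len(volumes) is reached), except that on
-- some N > len(volumes) inputs every volume dies out early and A returns -1 where B
-- itself raises IndexError — those N > len(volumes) inputs are excluded too.
def Pre_solution (N : Int) (S : Int) (M : Int) (volumes : List Int) : Prop :=
  -(M + 1) ≤ S ∧ S ≤ M ∧ 0 ≤ N ∧ N ≤ (volumes.length : Int)
instance (N : Int) (S : Int) (M : Int) (volumes : List Int) : Decidable (Pre_solution N S M volumes) := by unfold Pre_solution; infer_instance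

def pvWitness_solution : Int × Int × Int × List Int := (3, 5, 10, [5, 3, 7])

def Spec_solution (N : Int) (S : Int) (M : Int) (volumes : List Int) (out : Int) : Prop := out = solution_alt N S M volumes
instance (N : Int) (S : Int) (M : Int) (volumes : List Int) (out : Int) : Decidable (Spec_solution N S M volumes out) := by unfold Spec_solution; infer_instance

-- ===== CLAIM (what is proved, stated in full; the proofs are below) =====
def Claim_equal_solution : Prop := ∀ (N : Int) (S : Int) (M : Int) (volumes : List Int), Dom_solution N S M volumes → Pre_solution N S M volumes → Spec_solution N S M volumes (solution N S M volumes)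

-- ===== LEMMAS AND PROOFS =====

theorem getD_set_list (b : List (List Int)) (i : Nat) (r : List Int) (i' : Nat) :
    (b.set i r).getD i' [] = if i' = i ∧ i < b.length then r else b.getD i' [] := by
  simp only [List.getD_eq_getElem?_getD, List.getElem?_set]
  split_ifs with h1 h2 h3 <;> simp_all

theorem getD_set_int (l : List Int) (j : Nat) (x : Int) (j' : Nat) :
    (l.set j x).getD j' 0 = if j' = j ∧ j < l.length then x else l.getD j' 0 := by
  simp only [List.getD_eq_getElem?_getD, List.getElem?_set]
  split_ifs with h1 h2 h3 <;> simp_all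

theorem length_set2 (b : List (List Int)) (i j : Nat) :
    (pvSet2 b i j).length = b.length := by simp [pvSet2]

theorem rowlen_set2 (b : List (List Int)) (i j i' : Nat) :
    ((pvSet2 b i j).getD i' []).length = (b.getD i' []).length := by
  simp only [pvSet2, getD_set_list]
  split_ifs with h
  · obtain ⟨h1, h2⟩ := h; subst h1; simp
  · rfl

theorem get2_set2 (b : List (List Int)) (i j i' j' : Nat)
    (hi : i < b.length) (hj : j < (b.getD i []).length) :
    pvGet2 (pvSet2 b i j) i' j' = if i' = i ∧ j' = j then 1 else pvGet2 b i' j' := by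
  simp only [pvGet2, pvSet2, getD_set_list]
  by_cases h : i' = i
  · subst h
    simp only [hi, and_true, true_and, if_true, getD_set_int, hj]
  · simp [h]

def pvInnerA (volumes : List Int) (M : Int) (song : Nat) (b : List (List Int)) (volume : Nat) : List (List Int) :=
  if pvGet2 b song volume = 0 then b
  else
    let plus_vol := (volume : Int) + volumes.getD song 0
    let minus_vol := (volume : Int) - volumes.getD song 0
    let b := if 0 ≤ plus_vol ∧ plus_vol ≤ M then pvSet2 b (song + 1) plus_vol.toNat else b
    if 0 ≤ minus_vol ∧ minus_vol ≤ M then pvSet2 b (song + 1) minus_vol.toNat else b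

def pvOuterA (volumes : List Int) (M : Int) (b : List (List Int)) (song : Nat) : List (List Int) :=
  (List.range (M + 1).toNat).foldl (pvInnerA volumes M song) b

-- joint invariant of the inner (per-song) loop of A
theorem innerA_fold (volumes : List Int) (M : Int) (song : Nat) (b0 : List (List Int))
    (hrow : song + 1 < b0.length)
    (hlen : ((b0.getD (song + 1) []).length) = (M + 1).toNat) :
    ∀ n : Nat,
      (((List.range n).foldl (pvInnerA volumes M song) b0).length = b0.length
        ∧ ∀ i', ((((List.range n).foldl (pvInnerA volumes M song) b0).getD i' []).length) = (b0.getD i' []).length)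
      ∧ (∀ i', i' ≠ song + 1 → ∀ j', pvGet2 ((List.range n).foldl (pvInnerA volumes M song) b0) i' j' = pvGet2 b0 i' j')
      ∧ (∀ w : Nat, pvGet2 ((List.range n).foldl (pvInnerA volumes M song) b0) (song + 1) w ≠ 0 ↔
          (pvGet2 b0 (song + 1) w ≠ 0 ∨ ∃ v : Nat, v < n ∧ pvGet2 b0 song v ≠ 0 ∧
            ((w : Int) = (v : Int) + volumes.getD song 0 ∨ (w : Int) = (v : Int) - volumes.getD song 0) ∧ (w : Int) ≤ M)) := by
  intro n
  induction n with
  | zero => simp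
  | succ n ih =>
    obtain ⟨⟨hL, hRL⟩, hframe, hchar⟩ := ih
    set a := volumes.getD song 0 with ha
    set bn := (List.range n).foldl (pvInnerA volumes M song) b0 with hbn
    have hstep : (List.range (n+1)).foldl (pvInnerA volumes M song) b0 = pvInnerA volumes M song bn n := by
      rw [List.range_succ, List.foldl_append]; rfl
    rw [hstep]
    have hrow' : song + 1 < bn.length := by omega
    have hlen' : ((bn.getD (song + 1) []).length) = (M + 1).toNat := (hRL (song + 1)).trans hlen
    have hreadsong : pvGet2 bn song n = pvGet2 b0 song n := hframe song (by omega) n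
    by_cases hz : pvGet2 bn song n = 0
    · -- skip step
      have : pvInnerA volumes M song bn n = bn := by simp [pvInnerA, hz]
      rw [this]
      refine ⟨⟨hL, hRL⟩, hframe, fun w => ?_⟩
      rw [hchar w]
      constructor
      · rintro (h | ⟨v, hv, hvv⟩)
        · exact Or.inl h
        · exact Or.inr ⟨v, by omega, hvv⟩
      · rintro (h | ⟨v, hv, hnz, hrest⟩)
        · exact Or.inl h
        · refine Or.inr ⟨v, ?_, hnz, hrest⟩
          rcases Nat.lt_succ_iff_lt_or_eq.mp hv with h' | h'
          · exact h'
          · exfalso; subst h'; rw [← hreadsong] at hnz; exact hnz hz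
    · -- write step
      have hnz0 : pvGet2 b0 song n ≠ 0 := by rwa [hreadsong] at hz
      have hun : pvInnerA volumes M song bn n =
          (if 0 ≤ (n : Int) - a ∧ (n : Int) - a ≤ M then
            pvSet2 (if 0 ≤ (n : Int) + a ∧ (n : Int) + a ≤ M then pvSet2 bn (song + 1) ((n : Int) + a).toNat else bn)
              (song + 1) ((n : Int) - a).toNat
          else (if 0 ≤ (n : Int) + a ∧ (n : Int) + a ≤ M then pvSet2 bn (song + 1) ((n : Int) + a).toNat else bn)) := by
        simp only [pvInnerA, hz, ← ha]
        rfl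
      set b1 := (if 0 ≤ (n : Int) + a ∧ (n : Int) + a ≤ M then pvSet2 bn (song + 1) ((n : Int) + a).toNat else bn) with hb1
      have hL1 : b1.length = bn.length := by rw [hb1]; split_ifs <;> simp [length_set2]
      have hRL1 : ∀ i', ((b1.getD i' []).length) = ((bn.getD i' []).length) := by
        intro i'; rw [hb1]; split_ifs
        · exact rowlen_set2 _ _ _ _
        · rfl
      -- characterize b1
      have hget1 : ∀ i' j', pvGet2 b1 i' j' =
          if 0 ≤ (n : Int) + a ∧ (n : Int) + a ≤ M ∧ i' = song + 1 ∧ (j' : Int) = (n : Int) + a then 1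
          else pvGet2 bn i' j' := by
        intro i' j'; rw [hb1]
        split_ifs with h1 h2 h3
        · obtain ⟨_, _, h3a, h3b⟩ := h2
          rw [get2_set2 _ _ _ _ _ hrow' (by rw [hlen']; omega)]
          rw [if_pos ⟨h3a, by omega⟩]
        · rw [get2_set2 _ _ _ _ _ hrow' (by rw [hlen']; omega)]
          rw [if_neg]; rintro ⟨e1, e2⟩; exact h2 ⟨h1.1, h1.2, e1, by subst e2; omega⟩
        · exact absurd ⟨h3.1, h3.2.1⟩ h1
        · rfl
      set b2 := (if 0 ≤ (n : Int) - a ∧ (n : Int) - a ≤ M then pvSet2 b1 (song + 1) ((n : Int) - a).toNat else b1) with hb2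
      have hL2 : b2.length = b1.length := by rw [hb2]; split_ifs <;> simp [length_set2]
      have hRL2 : ∀ i', ((b2.getD i' []).length) = ((b1.getD i' []).length) := by
        intro i'; rw [hb2]; split_ifs
        · exact rowlen_set2 _ _ _ _
        · rfl
      have hrow1 : song + 1 < b1.length := by omega
      have hlen1 : ((b1.getD (song + 1) []).length) = (M + 1).toNat := (hRL1 (song + 1)).trans hlen'
      have hget2 : ∀ i' j', pvGet2 b2 i' j' =
          if 0 ≤ (n : Int) - a ∧ (n : Int) - a ≤ M ∧ i' = song + 1 ∧ (j' : Int) = (n : Int) - a then 1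
          else pvGet2 b1 i' j' := by
        intro i' j'; rw [hb2]
        split_ifs with h1 h2 h3
        · obtain ⟨_, _, h3a, h3b⟩ := h2
          rw [get2_set2 _ _ _ _ _ hrow1 (by rw [hlen1]; omega)]
          rw [if_pos ⟨h3a, by omega⟩]
        · rw [get2_set2 _ _ _ _ _ hrow1 (by rw [hlen1]; omega)]
          rw [if_neg]; rintro ⟨e1, e2⟩; exact h2 ⟨h1.1, h1.2, e1, by subst e2; omega⟩
        · exact absurd ⟨h3.1, h3.2.1⟩ h1
        · rfl
      have hres : pvInnerA volumes M song bn n = b2 := by rw [hun]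
      rw [hres]
      refine ⟨⟨by omega, fun i' => ((hRL2 i').trans (hRL1 i')).trans (hRL i')⟩, ?_, ?_⟩
      · intro i' hi' j'
        rw [hget2, if_neg (by rintro ⟨_, _, e, _⟩; exact hi' e), hget1,
          if_neg (by rintro ⟨_, _, e, _⟩; exact hi' e)]
        exact hframe i' hi' j'
      · intro w
        rw [hget2, hget1]
        constructor
        · intro h
          split_ifs at h with h1 h2
          · obtain ⟨ha1, ha2, _, ha4⟩ := h1
            exact Or.inr ⟨n, by omega, hnz0, Or.inr ha4, by omega⟩
          · obtain ⟨ha1, ha2, _, ha4⟩ := h2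
            exact Or.inr ⟨n, by omega, hnz0, Or.inl ha4, by omega⟩
          · rcases (hchar w).mp h with h' | ⟨v, hv, hvv⟩
            · exact Or.inl h'
            · exact Or.inr ⟨v, by omega, hvv⟩
        · intro h
          split_ifs with h1 h2
          · exact one_ne_zero
          · exact one_ne_zero
          · rcases h with h' | ⟨v, hv, hnzv, hvv, hwM⟩
            · exact (hchar w).mpr (Or.inl h')
            · rcases Nat.lt_succ_iff_lt_or_eq.mp hv with h'' | h''
              · exact (hchar w).mpr (Or.inr ⟨v, h'', hnzv, hvv, hwM⟩)
              · subst h''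
                rcases hvv with e | e
                · exact absurd ⟨by omega, by omega, rfl, e⟩ h2
                · exact absurd ⟨by omega, by omega, rfl, e⟩ h1

def pvStepB (M : Int) (s : PySem.Set Int) (w : Int) : PySem.Set Int :=
  if 0 ≤ w ∧ w ≤ M then PySem.Set.add s w else s

def pvInnerB (volumes : List Int) (M : Int) (song : Nat) (nxt : PySem.Set Int) (v : Int) : PySem.Set Int :=
  [v + volumes.getD song 0, v - volumes.getD song 0].foldl (pvStepB M) nxt

def pvOuterB (volumes : List Int) (M : Int) (r : PySem.Set Int) (song : Nat) : PySem.Set Int :=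
  r.foldl (pvInnerB volumes M song) PySem.Set.empty

theorem mem_stepB (M : Int) (s : PySem.Set Int) (w x : Int) :
    x ∈ pvStepB M s w ↔ x ∈ s ∨ (x = w ∧ 0 ≤ w ∧ w ≤ M) := by
  simp only [pvStepB]
  split_ifs with h
  · rw [PySem.Set.mem_add]; tauto
  · tauto

theorem mem_innerB_fold (volumes : List Int) (M : Int) (song : Nat) :
    ∀ (r : List Int) (nxt : PySem.Set Int) (x : Int),
      x ∈ r.foldl (pvInnerB volumes M song) nxt ↔
        x ∈ nxt ∨ ∃ v ∈ r, (x = v + volumes.getD song 0 ∨ x = v - volumes.getD song 0) ∧ 0 ≤ x ∧ x ≤ M := by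
  intro r
  induction r with
  | nil => simp
  | cons v t ih =>
    intro nxt x
    simp only [ih, pvInnerB, List.foldl, mem_stepB, List.mem_cons]
    constructor
    · rintro (((h | ⟨rfl, h0, hM⟩) | ⟨rfl, h0, hM⟩) | ⟨u, hu, hrest⟩)
      · exact Or.inl h
      · exact Or.inr ⟨v, Or.inl rfl, Or.inl rfl, h0, hM⟩
      · exact Or.inr ⟨v, Or.inl rfl, Or.inr rfl, h0, hM⟩
      · exact Or.inr ⟨u, Or.inr hu, hrest⟩
    · rintro (h | ⟨u, (rfl | hu), (rfl | rfl), h0, hM⟩)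
      · exact Or.inl (Or.inl (Or.inl h))
      · exact Or.inl (Or.inl (Or.inr ⟨rfl, h0, hM⟩))
      · exact Or.inl (Or.inr ⟨rfl, h0, hM⟩)
      · exact Or.inr ⟨u, hu, Or.inl rfl, h0, hM⟩
      · exact Or.inr ⟨u, hu, Or.inr rfl, h0, hM⟩

theorem scan_eq_max (board : List (List Int)) (LAST : Nat) (reach : List Int)
    (hchar : ∀ w : Nat, pvGet2 board LAST w ≠ 0 ↔ (w : Int) ∈ reach) :
    ∀ (n : Nat) (c : Int), (c + 1).toNat = n → (∀ x ∈ reach, 0 ≤ x ∧ x ≤ c) →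
      pvScan board LAST (PySem.List.pyRange c (-1) (-1)) =
        (PySem.List.max? reach (fun x => x)).getD (-1) := by
  intro n
  induction n with
  | zero =>
    intro c hc hsub
    rw [PySem.List.pyRange_neg_one_eq_nil (by omega : c ≤ (-1 : Int))]
    have hnil : reach = [] := by
      refine List.eq_nil_iff_forall_not_mem.mpr (fun x hx => ?_)
      have := hsub x hx; omega
    rw [hnil, (PySem.List.max?_eq_none_iff ([] : List Int) (fun x => x)).mpr rfl]
    rfl
  | succ n ih =>
    intro c hc hsub
    have hc0 : 0 ≤ c := by omega
    rw [PySem.List.pyRange_neg_one_cons (by omega : (-1 : Int) < c)]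
    have hcast : ((c.toNat : Int)) = c := Int.toNat_of_nonneg hc0
    by_cases hm : pvGet2 board LAST c.toNat ≠ 0
    · have hcin : c ∈ reach := by rw [← hcast]; exact (hchar c.toNat).mp hm
      rw [pvScan, if_pos hm]
      cases hmax : PySem.List.max? reach (fun x => x) with
      | none =>
        exfalso
        have : reach = [] := (PySem.List.max?_eq_none_iff reach (fun x => x)).mp hmax
        rw [this] at hcin; exact (List.not_mem_nil).elim hcin
      | some m =>
        have hmm : m ∈ reach := PySem.List.max?_mem hmax
        have h1 : m ≤ c := (hsub m hmm).2
        have h2 : c ≤ m := PySem.List.max?_isMax hmax c hcin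
        have : m = c := le_antisymm h1 h2
        rw [this]; rfl
    · have hcnot : c ∉ reach := by
        intro hcin
        exact hm ((hchar c.toNat).mpr (by rwa [hcast]))
      rw [pvScan, if_neg hm]
      refine ih (c - 1) (by omega) (fun x hx => ?_)
      have := hsub x hx
      have hne : x ≠ c := fun e => hcnot (e ▸ hx)
      constructor
      · exact this.1
      · have : x ≤ c := this.2
        omega

def pvInitA (N S M : Int) : List (List Int) :=
  pvSet2 (List.replicate (N + 1).toNat (List.replicate (M + 1).toNat (0 : Int))) 0 S.toNat

def pvAk (volumes : List Int) (N S M : Int) (k : Nat) : List (List Int) :=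
  (List.range k).foldl (pvOuterA volumes M) (pvInitA N S M)

def pvBk (volumes : List Int) (S M : Int) (k : Nat) : PySem.Set Int :=
  (List.range k).foldl (pvOuterB volumes M) (PySem.Set.ofList [S])

theorem pvGet2_replicate (n m i j : Nat) :
    pvGet2 (List.replicate n (List.replicate m (0 : Int))) i j = 0 := by
  simp only [pvGet2, List.getD_eq_getElem?_getD, List.getElem?_replicate]
  split_ifs with h
  · simp
  · simp

theorem outer_inv (volumes : List Int) (N S M : Int)
    (hS0 : 0 ≤ S) (hSM : S ≤ M) (hN : 0 ≤ N) :
    ∀ k : Nat, k ≤ N.toNat →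
      ((pvAk volumes N S M k).length = (N + 1).toNat
        ∧ (∀ i', i' ≤ N.toNat → ((pvAk volumes N S M k).getD i' []).length = (M + 1).toNat))
      ∧ (∀ i', k < i' → ∀ j', pvGet2 (pvAk volumes N S M k) i' j' = 0)
      ∧ (∀ w : Nat, pvGet2 (pvAk volumes N S M k) k w ≠ 0 ↔ (w : Int) ∈ pvBk volumes S M k)
      ∧ (∀ x ∈ pvBk volumes S M k, 0 ≤ x ∧ x ≤ M) := by
  have hM0 : 0 ≤ M := le_trans hS0 hSM
  have hNt : (N + 1).toNat = N.toNat + 1 := by omega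
  have hMt : (M + 1).toNat = M.toNat + 1 := by omega
  -- facts about the initial board
  have hinitL : (pvInitA N S M).length = (N + 1).toNat := by
    simp [pvInitA, length_set2]
  have hinitRL : ∀ i', i' ≤ N.toNat → ((pvInitA N S M).getD i' []).length = (M + 1).toNat := by
    intro i' hi'
    rw [pvInitA, rowlen_set2]
    simp only [List.getD_eq_getElem?_getD, List.getElem?_replicate]
    rw [if_pos (by omega)]
    simp
  have hget_init : ∀ i' j', pvGet2 (pvInitA N S M) i' j' =
      if i' = 0 ∧ j' = S.toNat then 1 else 0 := by
    intro i' j'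
    rw [pvInitA, get2_set2 _ _ _ _ _ (by simp; omega)
      (by simp only [List.getD_eq_getElem?_getD, List.getElem?_replicate]
          rw [if_pos (by omega)]; simp; omega)]
    rw [pvGet2_replicate]
  intro k
  induction k with
  | zero =>
    intro _
    refine ⟨⟨hinitL, hinitRL⟩, ?_, ?_, ?_⟩
    · intro i' hi' j'
      show pvGet2 (pvInitA N S M) i' j' = 0
      rw [hget_init, if_neg (by rintro ⟨e, _⟩; omega)]
    · intro w
      show pvGet2 (pvInitA N S M) 0 w ≠ 0 ↔ _
      rw [hget_init]
      have : (w : Int) ∈ pvBk volumes S M 0 ↔ (w : Int) = S := by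
        show (w : Int) ∈ PySem.Set.ofList [S] ↔ _
        rw [PySem.Set.mem_ofList]
        simp
      rw [this]
      split_ifs with h
      · simp only [ne_eq, one_ne_zero, not_false_eq_true, true_iff]; omega
      · simp only [ne_eq, not_true_eq_false, false_iff]
        intro e
        exact h ⟨rfl, by omega⟩
    · intro x hx
      have : x ∈ [S] := (PySem.Set.mem_ofList _ _).mp hx
      simp at this
      subst this
      exact ⟨hS0, hSM⟩
  | succ k ih =>
    intro hk1
    obtain ⟨⟨hL, hRL⟩, hzero, hchar, hsub⟩ := ih (by omega)
    have hAstep : pvAk volumes N S M (k + 1) =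
        (List.range (M + 1).toNat).foldl (pvInnerA volumes M k) (pvAk volumes N S M k) := by
      rw [pvAk, List.range_succ, List.foldl_append]
      rfl
    have hBstep : pvBk volumes S M (k + 1) =
        (pvBk volumes S M k).foldl (pvInnerB volumes M k) PySem.Set.empty := by
      rw [pvBk, List.range_succ, List.foldl_append]
      rfl
    obtain ⟨⟨sL, sRL⟩, fr, ch⟩ := innerA_fold volumes M k (pvAk volumes N S M k)
      (by omega) (hRL (k + 1) (by omega)) (M + 1).toNat
    rw [hAstep, hBstep]
    have hmemB : ∀ x : Int, x ∈ (pvBk volumes S M k).foldl (pvInnerB volumes M k) PySem.Set.empty ↔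
        ∃ v ∈ pvBk volumes S M k,
          (x = v + volumes.getD k 0 ∨ x = v - volumes.getD k 0) ∧ 0 ≤ x ∧ x ≤ M := by
      intro x
      rw [mem_innerB_fold]
      simp [PySem.Set.empty]
    refine ⟨⟨by rw [sL, hL], fun i' hi' => (sRL i').trans (hRL i' hi')⟩, ?_, ?_, ?_⟩
    · intro i' hi' j'
      rw [fr i' (by omega) j']
      exact hzero i' (by omega) j'
    · intro w
      rw [ch w, hmemB]
      have hz1 : pvGet2 (pvAk volumes N S M k) (k + 1) w = 0 := hzero (k + 1) (by omega) w
      constructor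
      · rintro (h | ⟨v, hv, hnz, he, hwM⟩)
        · exact absurd hz1 h
        · exact ⟨(v : Int), (hchar v).mp hnz, he, by omega, hwM⟩
      · rintro ⟨v, hv, he, hw0, hwM⟩
        obtain ⟨hv0, hvM⟩ := hsub v hv
        refine Or.inr ⟨v.toNat, by omega, ?_, ?_, hwM⟩
        · exact (hchar v.toNat).mpr (by rwa [Int.toNat_of_nonneg hv0])
        · rw [Int.toNat_of_nonneg hv0]
          exact he
    · intro x hx
      rw [hmemB] at hx
      obtain ⟨v, _, _, h0, hM'⟩ := hx
      exact ⟨h0, hM'⟩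


theorem mem_pvBk_succ (volumes : List Int) (S M : Int) (k : Nat) (x : Int) :
    x ∈ pvBk volumes S M (k + 1) ↔
      ∃ u ∈ pvBk volumes S M k,
        (x = u + volumes.getD k 0 ∨ x = u - volumes.getD k 0) ∧ 0 ≤ x ∧ x ≤ M := by
  have h : pvBk volumes S M (k + 1) =
      (pvBk volumes S M k).foldl (pvInnerB volumes M k) PySem.Set.empty := by
    rw [pvBk, List.range_succ, List.foldl_append]
    rfl
  rw [h, mem_innerB_fold]
  simp [PySem.Set.empty]

-- Python xs[i] / xs[i] = v with an in-range NEGATIVE index (wraps to len+i); exact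
theorem pyGetD_neg (xs : List Int) (S d : Int) (h1 : S < 0) (h2 : -(xs.length : Int) ≤ S) :
    PySem.List.pyGetD xs S d = xs.getD (((xs.length : Int) + S).toNat) d := by
  have hk : ((xs.length : Int) + S).toNat = xs.length - (-S).toNat := by omega
  simp only [PySem.List.pyGetD, PySem.List.pyGet?, PySem.List.pyIdx?,
    if_neg (by omega : ¬ (0 : Int) ≤ S), if_pos h2, Option.bind, hk]
  rw [List.getD_eq_getElem?_getD]

theorem pySetD_neg (xs : List Int) (S : Int) (v : Int) (h1 : S < 0) (h2 : -(xs.length : Int) ≤ S) :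
    PySem.List.pySetD xs S v = xs.set (((xs.length : Int) + S).toNat) v := by
  have hk : ((xs.length : Int) + S).toNat = xs.length - (-S).toNat := by omega
  simp only [PySem.List.pySetD, PySem.List.pySet?, PySem.List.pyIdx?,
    if_neg (by omega : ¬ (0 : Int) ≤ S), if_pos h2, Option.map, Option.getD, hk]

-- ===== B-side proof apparatus: the backward value-DP rows and path predicates =====
def pvRow (volumes : List Int) (M : Int) (j : Nat) (f : List Int) : List Int :=
  (PySem.List.pyRange 0 (M + 1)).map (fun v =>
    max (if 0 ≤ v + volumes.getD j 0 ∧ v + volumes.getD j 0 ≤ M then PySem.List.pyGetD f (v + volumes.getD j 0) 0 else -1)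
        (if 0 ≤ v - volumes.getD j 0 ∧ v - volumes.getD j 0 ≤ M then PySem.List.pyGetD f (v - volumes.getD j 0) 0 else -1))

def pvG (volumes : List Int) (M : Int) (Nn : Nat) : Nat → List Int
  | 0 => PySem.List.pyRange 0 (M + 1)
  | k + 1 => pvRow volumes M (Nn - (k + 1)) (pvG volumes M Nn k)

-- B's fold over range(N-1,-1,-1) computes pvG volumes M Nn Nn
theorem foldB_eq_pvG (volumes : List Int) (M : Int) (Nn : Nat) :
    ∀ (m k : Nat), m + k = Nn →
      (PySem.List.pyRange ((m : Int) - 1) (-1) (-1)).foldl (fun f song =>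
        let d := PySem.List.pyGetD volumes song 0
        (PySem.List.pyRange 0 (M + 1)).map (fun v =>
          max (if 0 ≤ v + d ∧ v + d ≤ M then PySem.List.pyGetD f (v + d) 0 else -1)
              (if 0 ≤ v - d ∧ v - d ≤ M then PySem.List.pyGetD f (v - d) 0 else -1))) (pvG volumes M Nn k)
      = pvG volumes M Nn Nn := by
  intro m
  induction m with
  | zero =>
    intro k hk
    rw [PySem.List.pyRange_neg_one_eq_nil (by omega : ((0 : Nat) : Int) - 1 ≤ -1)]
    simp only [List.foldl_nil]
    rw [show k = Nn by omega]
  | succ m ih =>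
    intro k hk
    rw [show ((m + 1 : Nat) : Int) - 1 = (m : Int) by push_cast; ring,
      PySem.List.pyRange_neg_one_cons (by omega : (-1 : Int) < (m : Int)), List.foldl_cons]
    have hd : PySem.List.pyGetD volumes ((m : Int)) 0 = volumes.getD m 0 := by
      rw [PySem.List.pyGetD_of_nonneg volumes 0 (by omega : (0 : Int) ≤ (m : Int))]
      simp
    rw [hd]
    have hGk1 : pvRow volumes M m (pvG volumes M Nn k) = pvG volumes M Nn (k + 1) := by
      show _ = pvRow volumes M (Nn - (k + 1)) (pvG volumes M Nn k)
      rw [show Nn - (k + 1) = m from by omega]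
    show (PySem.List.pyRange ((m : Int) - 1) (-1) (-1)).foldl (fun f song =>
        let d := PySem.List.pyGetD volumes song 0
        (PySem.List.pyRange 0 (M + 1)).map (fun v =>
          max (if 0 ≤ v + d ∧ v + d ≤ M then PySem.List.pyGetD f (v + d) 0 else -1)
              (if 0 ≤ v - d ∧ v - d ≤ M then PySem.List.pyGetD f (v - d) 0 else -1)))
        (pvRow volumes M m (pvG volumes M Nn k)) = pvG volumes M Nn Nn
    rw [hGk1]
    exact ih (k + 1) (by omega)

-- forward paths, decomposed at the LAST song (matches pvBk's forward evolution)
def pvRch (volumes : List Int) (M : Int) : Nat → Int → Int → Prop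
  | 0, v, x => x = v
  | k + 1, v, x => ∃ y, pvRch volumes M k v y ∧
      (x = y + volumes.getD k 0 ∨ x = y - volumes.getD k 0) ∧ 0 ≤ x ∧ x ≤ M

-- the same paths, decomposed at the FIRST song (matches the backward DP)
def pvPth (volumes : List Int) (M : Int) : Nat → Nat → Int → Int → Prop
  | 0, _, v, x => x = v
  | k + 1, j, v, x => ∃ w, (w = v + volumes.getD j 0 ∨ w = v - volumes.getD j 0) ∧
      0 ≤ w ∧ w ≤ M ∧ pvPth volumes M k (j + 1) w x

theorem mem_pvBk_iff_rch (volumes : List Int) (S M : Int) :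
    ∀ k x, x ∈ pvBk volumes S M k ↔ pvRch volumes M k S x := by
  intro k
  induction k with
  | zero =>
    intro x
    show x ∈ PySem.Set.ofList [S] ↔ x = S
    rw [PySem.Set.mem_ofList]
    simp
  | succ k ih =>
    intro x
    rw [mem_pvBk_succ]
    constructor
    · rintro ⟨u, hu, hrest⟩
      exact ⟨u, (ih u).mp hu, hrest⟩
    · rintro ⟨u, hu, hrest⟩
      exact ⟨u, (ih u).mpr hu, hrest⟩

theorem pth_snoc (volumes : List Int) (M : Int) :
    ∀ k j v x, pvPth volumes M (k + 1) j v x ↔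
      ∃ y, pvPth volumes M k j v y ∧
        (x = y + volumes.getD (j + k) 0 ∨ x = y - volumes.getD (j + k) 0) ∧ 0 ≤ x ∧ x ≤ M := by
  intro k
  induction k with
  | zero =>
    intro j v x
    show (∃ w, _ ∧ _ ∧ _ ∧ x = w) ↔ ∃ y, y = v ∧ _
    constructor
    · rintro ⟨w, hmove, h0, hM, rfl⟩
      exact ⟨v, rfl, by simpa using hmove, h0, hM⟩
    · rintro ⟨y, rfl, hmove, h0, hM⟩
      exact ⟨x, by simpa using hmove, h0, hM, rfl⟩
  | succ k ih =>
    intro j v x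
    show (∃ w, _ ∧ _ ∧ _ ∧ pvPth volumes M (k + 1) (j + 1) w x) ↔ _
    constructor
    · rintro ⟨w, hmove, h0, hM, hp⟩
      obtain ⟨y, hy, hrest⟩ := (ih (j + 1) w x).mp hp
      exact ⟨y, ⟨w, hmove, h0, hM, hy⟩, by rwa [show j + 1 + k = j + (k + 1) by omega] at hrest⟩
    · rintro ⟨y, ⟨w, hmove, h0, hM, hy⟩, hrest⟩
      exact ⟨w, hmove, h0, hM, (ih (j + 1) w x).mpr
        ⟨y, hy, by rwa [show j + (k + 1) = j + 1 + k by omega] at hrest⟩⟩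

theorem rch_iff_pth (volumes : List Int) (M : Int) :
    ∀ k v x, pvRch volumes M k v x ↔ pvPth volumes M k 0 v x := by
  intro k
  induction k with
  | zero => intro v x; exact Iff.rfl
  | succ k ih =>
    intro v x
    show (∃ y, pvRch volumes M k v y ∧ _) ↔ _
    rw [pth_snoc volumes M k 0 v x]
    simp only [Nat.zero_add]
    constructor
    · rintro ⟨y, hy, hr⟩; exact ⟨y, (ih v y).mp hy, hr⟩
    · rintro ⟨y, hy, hr⟩; exact ⟨y, (ih v y).mpr hy, hr⟩

theorem pth_nonneg (volumes : List Int) (M : Int) :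
    ∀ k j v x, pvPth volumes M k j v x → 0 ≤ v → 0 ≤ x := by
  intro k
  induction k with
  | zero => intro j v x h hv; rwa [show x = v from h]
  | succ k ih =>
    rintro j v x ⟨w, _, h0, _, hp⟩ _
    exact ih (j + 1) w x hp h0

-- combining the two move branches under max
theorem max_branch_spec {P Q : Int → Prop} {a b : Int}
    (ha : (P a ∧ ∀ x, P x → x ≤ a) ∨ (a = -1 ∧ ∀ x, ¬ P x))
    (hb : (Q b ∧ ∀ x, Q x → x ≤ b) ∨ (b = -1 ∧ ∀ x, ¬ Q x))
    (hPn : ∀ x, P x → 0 ≤ x) (hQn : ∀ x, Q x → 0 ≤ x) :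
    ((P (max a b) ∨ Q (max a b)) ∧ ∀ x, P x ∨ Q x → x ≤ max a b)
    ∨ (max a b = -1 ∧ ∀ x, ¬ (P x ∨ Q x)) := by
  rcases ha with ⟨hPa, hamax⟩ | ⟨hae, hPe⟩ <;> rcases hb with ⟨hQb, hbmax⟩ | ⟨hbe, hQe⟩
  · left
    by_cases hab : a ≤ b
    · rw [max_eq_right hab]
      exact ⟨Or.inr hQb, fun x hx => hx.elim (fun h => le_trans (hamax x h) hab) (fun h => hbmax x h)⟩
    · rw [max_eq_left (by omega)]
      exact ⟨Or.inl hPa, fun x hx => hx.elim (fun h => hamax x h) (fun h => le_trans (hbmax x h) (by omega))⟩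
  · have ha0 : 0 ≤ a := hPn a hPa
    rw [max_eq_left (by omega)]
    exact Or.inl ⟨Or.inl hPa, fun x hx => hx.elim (fun h => hamax x h) (fun h => absurd h (hQe x))⟩
  · have hb0 : 0 ≤ b := hQn b hQb
    rw [max_eq_right (by omega)]
    exact Or.inl ⟨Or.inr hQb, fun x hx => hx.elim (fun h => absurd h (hPe x)) (fun h => hbmax x h)⟩
  · right
    rw [hae, hbe]
    exact ⟨rfl, fun x hx => hx.elim (hPe x) (hQe x)⟩

-- main invariant of the backward DP: entry v of row pvG k is the maximum volume
-- attainable along a path over the last k songs starting at volume v, or -1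
theorem g_spec (volumes : List Int) (M : Int) (hM : 0 ≤ M) (Nn : Nat) :
    ∀ k, k ≤ Nn →
      (pvG volumes M Nn k).length = (M + 1).toNat ∧
      ∀ v : Int, 0 ≤ v → v ≤ M →
        ((pvPth volumes M k (Nn - k) v ((pvG volumes M Nn k).getD v.toNat 0) ∧
            ∀ x, pvPth volumes M k (Nn - k) v x → x ≤ (pvG volumes M Nn k).getD v.toNat 0)
          ∨ ((pvG volumes M Nn k).getD v.toNat 0 = -1 ∧ ∀ x, ¬ pvPth volumes M k (Nn - k) v x)) := by
  have hcast : (M + 1 : Int) = (((M + 1).toNat : Nat) : Int) := by omega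
  have hbase : pvG volumes M Nn 0 = List.map (fun k : Nat => (k : Int)) (List.range (M + 1).toNat) := by
    show PySem.List.pyRange 0 (M + 1) = _
    conv_lhs => rw [hcast]
    rw [PySem.List.pyRange_zero_natCast]
  intro k
  induction k with
  | zero =>
    refine fun _ => ⟨by rw [hbase]; simp, fun v hv0 hvM => ?_⟩
    have hval : (pvG volumes M Nn 0).getD v.toNat 0 = v := by
      rw [hbase, PySem.List.getD_map_range _ _ _ _ (by omega)]
      omega
    rw [hval]
    exact Or.inl ⟨rfl, fun x hx => le_of_eq hx⟩
  | succ k ih =>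
    intro hk1
    obtain ⟨hlen, hspec⟩ := ih (by omega)
    set j := Nn - (k + 1) with hj
    have hjk : Nn - k = j + 1 := by omega
    set d := volumes.getD j 0 with hd
    have hGrow : pvG volumes M Nn (k + 1) = pvRow volumes M j (pvG volumes M Nn k) := rfl
    set G := pvG volumes M Nn k with hG
    -- entry v of the new row
    have hentry : ∀ v : Int, 0 ≤ v → v ≤ M →
        (pvG volumes M Nn (k + 1)).getD v.toNat 0 =
          max (if 0 ≤ v + d ∧ v + d ≤ M then G.getD (v + d).toNat 0 else -1)
              (if 0 ≤ v - d ∧ v - d ≤ M then G.getD (v - d).toNat 0 else -1) := by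
      intro v hv0 hvM
      rw [hGrow, pvRow, hcast, PySem.List.pyRange_zero_natCast, List.map_map]
      rw [PySem.List.getD_map_range _ _ _ _ (by omega : v.toNat < (M + 1).toNat)]
      have hvv : ((v.toNat : Nat) : Int) = v := by omega
      simp only [Function.comp, hvv, ← hd]
      congr 1
      · split_ifs with h
        · rw [PySem.List.pyGetD_of_nonneg _ _ h.1]
        · rfl
      · split_ifs with h
        · rw [PySem.List.pyGetD_of_nonneg _ _ h.1]
        · rfl
    have hlen1 : (pvG volumes M Nn (k + 1)).length = (M + 1).toNat := by
      rw [hGrow, pvRow, hcast, PySem.List.pyRange_zero_natCast]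
      simp
      omega
    refine ⟨hlen1, fun v hv0 hvM => ?_⟩
    -- the two move branches as predicates
    have hpth : ∀ x, pvPth volumes M (k + 1) j v x ↔
        (((0 ≤ v + d ∧ v + d ≤ M) ∧ pvPth volumes M k (j + 1) (v + d) x) ∨
         ((0 ≤ v - d ∧ v - d ≤ M) ∧ pvPth volumes M k (j + 1) (v - d) x)) := by
      intro x
      constructor
      · rintro ⟨w, (rfl | rfl), h0, hMw, hp⟩
        · exact Or.inl ⟨⟨h0, hMw⟩, hp⟩
        · exact Or.inr ⟨⟨h0, hMw⟩, hp⟩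
      · rintro (⟨⟨h0, hMw⟩, hp⟩ | ⟨⟨h0, hMw⟩, hp⟩)
        · exact ⟨v + d, Or.inl rfl, h0, hMw, hp⟩
        · exact ⟨v - d, Or.inr rfl, h0, hMw, hp⟩
    have hbranch : ∀ w : Int, ∀ a : Int,
        (if 0 ≤ w ∧ w ≤ M then G.getD w.toNat 0 else -1) = a →
        ((((0 ≤ w ∧ w ≤ M) ∧ pvPth volumes M k (j + 1) w a) ∧
            ∀ x, ((0 ≤ w ∧ w ≤ M) ∧ pvPth volumes M k (j + 1) w x) → x ≤ a)
          ∨ (a = -1 ∧ ∀ x, ¬ ((0 ≤ w ∧ w ≤ M) ∧ pvPth volumes M k (j + 1) w x))) := by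
      intro w a hdef
      by_cases hw : 0 ≤ w ∧ w ≤ M
      · rw [if_pos hw] at hdef
        rcases hspec w hw.1 hw.2 with ⟨hp, hmax⟩ | ⟨hneg, hnone⟩
        · rw [hjk] at hp hmax
          subst hdef
          exact Or.inl ⟨⟨hw, hp⟩, fun x hx => hmax x hx.2⟩
        · rw [hjk] at hnone
          subst hdef
          exact Or.inr ⟨hneg, fun x hx => hnone x hx.2⟩
      · rw [if_neg hw] at hdef
        subst hdef
        exact Or.inr ⟨rfl, fun x hx => hw hx.1⟩
    have := max_branch_spec
      (P := fun x => (0 ≤ v + d ∧ v + d ≤ M) ∧ pvPth volumes M k (j + 1) (v + d) x)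
      (Q := fun x => (0 ≤ v - d ∧ v - d ≤ M) ∧ pvPth volumes M k (j + 1) (v - d) x)
      (hbranch (v + d) _ rfl) (hbranch (v - d) _ rfl)
      (fun x hx => pth_nonneg volumes M k (j + 1) (v + d) x hx.2 hx.1.1)
      (fun x hx => pth_nonneg volumes M k (j + 1) (v - d) x hx.2 hx.1.1)
    rw [hentry v hv0 hvM]
    rcases this with ⟨hmem, hmax⟩ | ⟨hneg, hnone⟩
    · exact Or.inl ⟨(hpth _).mpr hmem, fun x hx => hmax x ((hpth x).mp hx)⟩
    · exact Or.inr ⟨hneg, fun x hx => hnone x ((hpth x).mp hx)⟩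

-- ===== VERDICT (by name: the statement is the Claim_ definition above) =====
theorem solution_spec : Claim_equal_solution := by
  intro N S M volumes _ hpre
  obtain ⟨hSlo, hSM, hN0, hNlen⟩ := hpre
  unfold Spec_solution
  have hM0 : 0 ≤ M := by omega
  set w0 : Int := if 0 ≤ S then S else M + 1 + S with hw0
  have hw00 : 0 ≤ w0 := by rw [hw0]; split_ifs <;> omega
  have hw0M : w0 ≤ M := by rw [hw0]; split_ifs <;> omega
  set Nn := N.toNat with hNn
  -- A's initial write board[0][S] = 1 lands at column w0
  have hrow0 : ((List.replicate (N + 1).toNat (List.replicate (M + 1).toNat (0 : Int))).getD 0 [])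
      = List.replicate (M + 1).toNat (0 : Int) := by
    rw [List.getD_eq_getElem?_getD, List.getElem?_replicate, if_pos (by omega)]
    rfl
  have hinit : (List.replicate (N + 1).toNat (List.replicate (M + 1).toNat (0 : Int))).set 0
      (PySem.List.pySetD ((List.replicate (N + 1).toNat (List.replicate (M + 1).toNat (0 : Int))).getD 0 []) S 1)
      = pvInitA N w0 M := by
    rw [hrow0]
    by_cases hS : 0 ≤ S
    · rw [PySem.List.pySetD_of_nonneg _ _ hS, pvInitA, pvSet2, hrow0,
        show w0 = S by rw [hw0, if_pos hS]]
    · rw [pySetD_neg _ _ _ (by omega) (by simp; omega), pvInitA, pvSet2, hrow0]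
      have : (((List.replicate (M + 1).toNat (0 : Int)).length : Int) + S).toNat = w0.toNat := by
        simp only [List.length_replicate]
        rw [hw0, if_neg hS]
        omega
      rw [this]
  have hA : solution N S M volumes = find_max_volume M (pvAk volumes N w0 M Nn) := by
    show find_max_volume M ((List.range N.toNat).foldl (pvOuterA volumes M) _) = _
    rw [hinit]
    rfl
  -- B computes the backward DP rows pvG
  have hB : solution_alt N S M volumes = PySem.List.pyGetD (pvG volumes M Nn Nn) S 0 := by
    have h1 : solution_alt N S M volumes = PySem.List.pyGetD
        ((PySem.List.pyRange (N - 1) (-1) (-1)).foldl (fun f song =>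
          let d := PySem.List.pyGetD volumes song 0
          (PySem.List.pyRange 0 (M + 1)).map (fun v =>
            max (if 0 ≤ v + d ∧ v + d ≤ M then PySem.List.pyGetD f (v + d) 0 else -1)
                (if 0 ≤ v - d ∧ v - d ≤ M then PySem.List.pyGetD f (v - d) 0 else -1)))
          (pvG volumes M Nn 0)) S 0 := rfl
    rw [h1, show (N - 1 : Int) = ((Nn : Nat) : Int) - 1 by omega,
      foldB_eq_pvG volumes M Nn Nn 0 (by omega)]
  rw [hA, hB]
  obtain ⟨⟨hL, _⟩, _, hchar, hsub⟩ := outer_inv volumes N w0 M hw00 hw0M hN0 Nn le_rfl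
  have hfm : find_max_volume M (pvAk volumes N w0 M Nn) =
      pvScan (pvAk volumes N w0 M Nn) ((pvAk volumes N w0 M Nn).length - 1)
        (PySem.List.pyRange M (-1) (-1)) := rfl
  rw [hfm, hL, show (N + 1).toNat - 1 = Nn by omega,
    scan_eq_max _ _ _ hchar (M + 1).toNat M rfl hsub]
  -- B reads entry w0 of the final row (negative S wraps)
  obtain ⟨hglen, hgspec⟩ := g_spec volumes M hM0 Nn Nn le_rfl
  have hread : PySem.List.pyGetD (pvG volumes M Nn Nn) S 0 = (pvG volumes M Nn Nn).getD w0.toNat 0 := by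
    by_cases hS : 0 ≤ S
    · rw [PySem.List.pyGetD_of_nonneg _ _ hS, show w0 = S by rw [hw0, if_pos hS]]
    · rw [pyGetD_neg _ _ _ (by omega) (by rw [hglen]; omega)]
      congr 1
      rw [hglen, hw0, if_neg hS]
      omega
  rw [hread]
  -- the two sides describe the same path set
  have hmem : ∀ x : Int, x ∈ pvBk volumes w0 M Nn ↔ pvPth volumes M Nn 0 w0 x := by
    intro x
    rw [mem_pvBk_iff_rch, rch_iff_pth]
  rcases hgspec w0 hw00 hw0M with ⟨hp, hmax⟩ | ⟨hneg, hnone⟩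
  · rw [Nat.sub_self] at hp hmax
    have hin : (pvG volumes M Nn Nn).getD w0.toNat 0 ∈ pvBk volumes w0 M Nn := (hmem _).mpr hp
    cases hmx : PySem.List.max? (pvBk volumes w0 M Nn) (fun x => x) with
    | none =>
      exact absurd hin (by
        rw [(PySem.List.max?_eq_none_iff _ _).mp hmx]
        exact List.not_mem_nil)
    | some m =>
      have h1 : m ≤ (pvG volumes M Nn Nn).getD w0.toNat 0 :=
        hmax m ((hmem m).mp (PySem.List.max?_mem hmx))
      have h2 : (pvG volumes M Nn Nn).getD w0.toNat 0 ≤ m := PySem.List.max?_isMax hmx _ hin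
      simp only [Option.getD_some]
      omega
  · rw [Nat.sub_self] at hnone
    have hnil : pvBk volumes w0 M Nn = [] := by
      refine List.eq_nil_iff_forall_not_mem.mpr (fun x hx => hnone x ((hmem x).mp hx))
    rw [hnil, (PySem.List.max?_eq_none_iff ([] : List Int) (fun x => x)).mpr rfl, hneg]
    rfl
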